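-- pv_equiv track=rewrite | github.com/kubo455/portfolio | my_project/helper.py | chart_color
-- ===== SOURCE A (Python) =====
-- def chart_color(r, g, b, color_count):
-- # Create color for expence pie chart
--
--     base_color = [r, g, b]
--     rgb_colors = []
--
--     factor = 0.2
--
--     for i in range(color_count):
--         color = []
--         for j in base_color:
--             j = int(j * (1 - factor))
--             color.append(j)
--         formated_rgb = f"rgb{color[0], color[1], color[2]}"
--         base_color = color
--         rgb_colors.append(formated_rgb)
--
--     return(rgb_colors)
-- ===== SOURCE B (Python) =====
-- def chart_color(r, g, b, color_count):
--     # Channel-major: decay each channel independently, then zip the three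
--     # sequences and format each triple.
--     def decay(v):
--         seq = []
--         for _ in range(color_count):
--             v = int(v * (1 - 0.2))
--             seq.append(v)
--         return seq
--     return [f"rgb{t}" for t in zip(decay(r), decay(g), decay(b))]
-- ===== Notes on version B (the rewrite author's own statement) =====
-- stated objective: alternative
-- what changed: Replaces A's row-major loop that rolls a 3-element base_color list through each step with three independent per-channel decay passes whose results are zipped and formatted.
import Mathlib
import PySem

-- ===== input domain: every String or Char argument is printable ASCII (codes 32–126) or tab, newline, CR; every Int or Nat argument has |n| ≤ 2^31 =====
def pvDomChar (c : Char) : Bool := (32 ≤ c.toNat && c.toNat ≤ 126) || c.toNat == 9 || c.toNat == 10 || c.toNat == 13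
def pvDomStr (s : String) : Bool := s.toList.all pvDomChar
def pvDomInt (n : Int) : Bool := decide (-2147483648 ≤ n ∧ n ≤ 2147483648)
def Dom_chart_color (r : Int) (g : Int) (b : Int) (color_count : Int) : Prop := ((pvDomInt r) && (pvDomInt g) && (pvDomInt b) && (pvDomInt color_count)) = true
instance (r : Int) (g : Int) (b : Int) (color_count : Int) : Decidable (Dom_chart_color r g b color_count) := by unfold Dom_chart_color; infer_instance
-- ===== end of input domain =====

-- B restructures A's rolling 3-element list into three independent per-channel
-- decay passes that are zipped and formatted (alternative decomposition, same cost).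

-- Shared float-semantics primitive: exact model of Python's `int(j * (1 - 0.2))`.
-- `1 - 0.2` is the IEEE double 3602879701896397/2^52; the product `j * that` is
-- rounded to nearest-even to 53 significant bits and then truncated toward zero.
-- Exact for every Int j (the exact product always fits the double exponent range
-- on the inputs reached here); checked against CPython over the full ±2^31 domain.
def truncMul08 (j : Int) : Int :=
  if j = 0 then 0
  else
    let a : Nat := j.natAbs * 3602879701896397
    let sh : Nat := (Nat.log2 a + 1) - 53
    let q0 : Nat := a / 2 ^ sh
    let rem : Nat := a % 2 ^ sh
    let half : Nat := 2 ^ (sh - 1)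
    let q : Nat := if half < rem ∨ (rem = half ∧ q0 % 2 = 1) then q0 + 1 else q0
    let v : Nat := q * 2 ^ sh / 2 ^ 52
    if 0 < j then (v : Int) else -(v : Int)

-- ===== PORT A =====
-- one iteration of A's `for i in range(color_count)` body
def chartStep (st : List Int × List String) (_i : Int) : List Int × List String :=
  let color := st.1.foldl (fun c j => c ++ [truncMul08 j]) []
  let formated_rgb :=
    "rgb(" ++ PySem.Int.toStr (PySem.List.pyGetD color 0 0) ++ ", "
           ++ PySem.Int.toStr (PySem.List.pyGetD color 1 0) ++ ", "
           ++ PySem.Int.toStr (PySem.List.pyGetD color 2 0) ++ ")"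
  (color, st.2 ++ [formated_rgb])

def chart_color (r : Int) (g : Int) (b : Int) (color_count : Int) : List String :=
  ((PySem.List.pyRange 0 color_count 1).foldl chartStep ([r, g, b], [])).2

-- ===== PORT B =====
-- B's per-channel decay pass
def decayStep (st : Int × List Int) (_i : Int) : Int × List Int :=
  let w := truncMul08 st.1
  (w, st.2 ++ [w])

def decayChan (color_count : Int) (v : Int) : List Int :=
  ((PySem.List.pyRange 0 color_count 1).foldl decayStep (v, [])).2

def fmtTriple (t : Int × Int × Int) : String :=
  "rgb(" ++ PySem.Int.toStr t.1 ++ ", " ++ PySem.Int.toStr t.2.1 ++ ", "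
         ++ PySem.Int.toStr t.2.2 ++ ")"

def chart_color_alt (r : Int) (g : Int) (b : Int) (color_count : Int) : List String :=
  ((decayChan color_count r).zip ((decayChan color_count g).zip (decayChan color_count b))).map fmtTriple

-- ===== PRECONDITION & SPEC =====
def Spec_chart_color (r : Int) (g : Int) (b : Int) (color_count : Int) (out : List String) : Prop := out = chart_color_alt r g b color_count
instance (r : Int) (g : Int) (b : Int) (color_count : Int) (out : List String) : Decidable (Spec_chart_color r g b color_count out) := by unfold Spec_chart_color; infer_instance

-- ===== CLAIM (what is proved, stated in full; the proofs are below) =====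
def Claim_equal_chart_color : Prop := ∀ (r : Int) (g : Int) (b : Int) (color_count : Int), Dom_chart_color r g b color_count → Spec_chart_color r g b color_count (chart_color r g b color_count)

-- ===== LEMMAS AND PROOFS =====

-- reference: the formatted strings produced from starting channels a b c in n steps
def refStrs (a b c : Int) : Nat → List String
  | 0 => []
  | n + 1 =>
      fmtTriple (truncMul08 a, truncMul08 b, truncMul08 c)
        :: refStrs (truncMul08 a) (truncMul08 b) (truncMul08 c) n

-- one channel's decay chain
def chain (v : Int) : Nat → List Int
  | 0 => []
  | n + 1 => truncMul08 v :: chain (truncMul08 v) n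

lemma foldl_chartStep (l : List Int) :
    ∀ (a b c : Int) (acc : List String),
      (l.foldl chartStep ([a, b, c], acc)).2 = acc ++ refStrs a b c l.length := by
  induction l with
  | nil => intro a b c acc; simp [refStrs]
  | cons x xs ih =>
      intro a b c acc
      have hstep : chartStep ([a, b, c], acc) x =
          ([truncMul08 a, truncMul08 b, truncMul08 c],
            acc ++ [fmtTriple (truncMul08 a, truncMul08 b, truncMul08 c)]) := by
        simp [chartStep, fmtTriple, PySem.List.pyGetD_zero_cons]
        rfl
      simp only [List.foldl_cons, hstep, ih, refStrs, List.length_cons]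
      simp

lemma foldl_decayStep (l : List Int) :
    ∀ (v : Int) (acc : List Int),
      (l.foldl decayStep (v, acc)).2 = acc ++ chain v l.length := by
  induction l with
  | nil => intro v acc; simp [chain]
  | cons x xs ih =>
      intro v acc
      simp only [List.foldl_cons, decayStep, ih, chain, List.length_cons]
      simp

lemma zip_chain (n : Nat) :
    ∀ (a b c : Int),
      ((chain a n).zip ((chain b n).zip (chain c n))).map fmtTriple = refStrs a b c n := by
  induction n with
  | zero => intro a b c; simp [chain, refStrs]
  | succ m ih =>
      intro a b c
      simp only [chain, List.zip_cons_cons, List.map_cons, refStrs]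
      rw [ih]

-- ===== VERDICT (by name: the statement is the Claim_ definition above) =====
theorem chart_color_spec : Claim_equal_chart_color := by
  intro r g b cc _
  unfold Spec_chart_color chart_color chart_color_alt decayChan
  rw [foldl_chartStep, foldl_decayStep, foldl_decayStep, foldl_decayStep]
  simp [zip_chain]
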